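-- pv_equiv track=rewrite | github.com/asantos2000/master-data-structures-algorithms | lista02/separa_par_impar_v0.py | segrega_par_impar
-- ===== SOURCE A (Python) =====
-- def segrega_par_impar(V):
--     tamanho = len(V)
--     A = [None]*tamanho
--     j = 0
--     k = tamanho - 1
--     for i in range(0, tamanho):
--         if V[i] % 2 == 0:
--             A[j] = V[i]
--             j = j + 1
--         else:
--             A[k] = V[i]
--             k = k - 1
--
--     return A, k + 1
-- ===== SOURCE B (Python) =====
-- def segrega_par_impar(V):
--     evens = [x for x in V if x % 2 == 0]
--     odds = [x for x in V if x % 2 != 0]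
--     return evens + odds[::-1], len(evens)
-- ===== Notes on version B (the rewrite author's own statement) =====
-- stated objective: simpler
-- what changed: Replaced the two-pointer in-place fill of a preallocated array by two filtered lists concatenated (odds reversed), with the boundary derived from len(evens) instead of a descending pointer.
import Mathlib
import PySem

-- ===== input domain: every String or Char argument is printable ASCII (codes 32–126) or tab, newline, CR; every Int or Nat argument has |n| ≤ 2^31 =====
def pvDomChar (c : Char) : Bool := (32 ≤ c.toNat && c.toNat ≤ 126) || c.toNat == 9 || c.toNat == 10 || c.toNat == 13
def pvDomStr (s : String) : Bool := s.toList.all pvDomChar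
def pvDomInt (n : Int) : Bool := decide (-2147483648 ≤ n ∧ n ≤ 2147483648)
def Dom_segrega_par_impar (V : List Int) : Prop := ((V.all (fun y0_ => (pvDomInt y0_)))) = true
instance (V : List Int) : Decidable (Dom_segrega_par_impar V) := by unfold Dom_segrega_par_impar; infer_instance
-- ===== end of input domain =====

-- B replaces A's two-pointer in-place fill by two filters concatenated (odds reversed); objective: simpler.

-- ===== PORT A =====
-- the loop 'for i in range(0, tamanho)' reads V[i] in order, so it is ported as structural
-- recursion over V carrying the same state (A, j, k); A[j]=V[i] / A[k]=V[i] become List.set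
-- (j and k are always nonnegative when used as an index, so .toNat is exact).
def segrega_par_impar_loop : List Int → List (Option Int) → Int → Int → List (Option Int) × Int × Int
  | [], A, j, k => (A, j, k)
  | v :: rest, A, j, k =>
    if v % 2 = 0 then segrega_par_impar_loop rest (A.set j.toNat (some v)) (j + 1) k
    else segrega_par_impar_loop rest (A.set k.toNat (some v)) j (k - 1)

def segrega_par_impar (V : List Int) : List Int × Int :=
  let tamanho := V.length
  let A : List (Option Int) := List.replicate tamanho none   -- [None]*tamanho
  let r := segrega_par_impar_loop V A 0 ((tamanho : Int) - 1)
  -- after the loop every slot is filled, so unwrapping the Options is exact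
  (r.1.map (fun o => o.getD 0), r.2.2 + 1)

-- ===== PORT B =====
def segrega_par_impar_alt (V : List Int) : List Int × Int :=
  let evens := V.filter (fun x => x % 2 == 0)
  let odds := V.filter (fun x => x % 2 != 0)
  (evens ++ odds.reverse, (evens.length : Int))

-- ===== PRECONDITION & SPEC =====
def Spec_segrega_par_impar (V : List Int) (out : List Int × Int) : Prop := out = segrega_par_impar_alt V
instance (V : List Int) (out : List Int × Int) : Decidable (Spec_segrega_par_impar V out) := by unfold Spec_segrega_par_impar; infer_instance

-- ===== CLAIM (what is proved, stated in full; the proofs are below) =====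
def Claim_equal_segrega_par_impar : Prop := ∀ (V : List Int), Dom_segrega_par_impar V → Spec_segrega_par_impar V (segrega_par_impar V)

-- ===== LEMMAS AND PROOFS =====

-- Loop invariant: the array is (filled evens) ++ blanks ++ (filled odds, already reversed),
-- j is the number of evens placed, k points at the last blank.
lemma segrega_par_impar_loop_inv (rest : List Int) : ∀ (e ro : List Int),
    segrega_par_impar_loop rest
      (e.map some ++ List.replicate rest.length none ++ ro.map some)
      (e.length : Int) ((e.length : Int) + (rest.length : Int) - 1)
    = ((e ++ rest.filter (fun x => x % 2 == 0)).map some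
         ++ ((rest.filter (fun x => x % 2 != 0)).reverse ++ ro).map some,
       ((e.length + (rest.filter (fun x => x % 2 == 0)).length : Nat) : Int),
       ((e.length + (rest.filter (fun x => x % 2 == 0)).length : Nat) : Int) - 1) := by
  induction rest with
  | nil => intro e ro; simp [segrega_par_impar_loop]
  | cons v rest ih =>
    intro e ro
    by_cases hv : v % 2 = 0
    · have hset : (e.map some ++ List.replicate (v :: rest).length none ++ ro.map some).set
          ((e.length : Int)).toNat (some v)
          = (e ++ [v]).map some ++ List.replicate rest.length none ++ ro.map some := by
        simp [List.replicate_succ]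
      have hj : ((e.length : Int) + 1) = (((e ++ [v]).length : Nat) : Int) := by
        simp
      have hk : (e.length : Int) + ((v :: rest).length : Int) - 1
          = (((e ++ [v]).length : Nat) : Int) + (rest.length : Int) - 1 := by
        simp; omega
      simp only [segrega_par_impar_loop, hv, hset, hj, hk]
      rw [ih (e ++ [v]) ro]
      simp [hv]
      omega
    · have hkt : ((e.length : Int) + ((v :: rest).length : Int) - 1).toNat
          = e.length + rest.length := by simp; omega
      have hset : (e.map some ++ List.replicate (v :: rest).length none ++ ro.map some).set
          (e.length + rest.length) (some v)
          = e.map some ++ List.replicate rest.length none ++ (v :: ro).map some := by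
        have : (List.replicate ((v :: rest).length) (none : Option Int))
            = List.replicate rest.length none ++ [none] := by
          simp [List.replicate_succ']
        rw [this]
        simp [List.append_assoc]
      have hk : (e.length : Int) + ((v :: rest).length : Int) - 1 - 1
          = (e.length : Int) + (rest.length : Int) - 1 := by simp; omega
      simp only [segrega_par_impar_loop, if_neg hv, hkt, hset, hk]
      rw [ih e (v :: ro)]
      simp [hv]

lemma segrega_par_impar_eq (V : List Int) :
    segrega_par_impar V = segrega_par_impar_alt V := by
  unfold segrega_par_impar segrega_par_impar_alt
  have h := segrega_par_impar_loop_inv V [] []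
  simp only [List.map_nil, List.nil_append, List.append_nil, List.length_nil,
    Nat.cast_zero, zero_add] at h
  simp only [h]
  simp

-- ===== VERDICT (by name: the statement is the Claim_ definition above) =====
theorem segrega_par_impar_spec : Claim_equal_segrega_par_impar := by
  intro V _
  exact segrega_par_impar_eq V
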